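-- pv_equiv track=rewrite | github.com/Zero-Vec/PythonACM | 蓝桥真题/第27场蓝桥月赛/5.py | solve
-- ===== SOURCE A (Python) =====
-- from collections import defaultdict
--
-- MOD = 10**9 + 7
--
-- def solve(N, D, A):
--
--     # 按国家分组，记录每个国家的电脑编号列表
--     cou_group = defaultdict(list)
--     for i in range(N):
--         cou_group[A[i]].append(i + 1)
--
--     dp = [1]  # dp[k] 表示选择 k 台电脑的合法方式数量
--
--     for computers in cou_group.values():
--         computers.sort()  # 将电脑编号排序
--         n = len(computers)
--         # 计算当前国家的合法方式
--         # 选择 0 台：1 种方式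
--         # 选择 1 台：n 种方式
--         # 选择 2 台：满足距离不超过 D 的方式
--         count_2 = 0
--         left = 0
--         for right in range(n):
--             while computers[right] - computers[left] > D:
--                 left += 1
--             count_2 += right - left
--         # 更新 dp
--         new_dp = [0] * (len(dp) + 2)
--         for k in range(len(dp)):
--             new_dp[k] = (new_dp[k] + dp[k]) % MOD  # 不选当前国家的电脑
--             new_dp[k + 1] = (new_dp[k + 1] + dp[k] * n) % MOD  # 选 1 台
--             new_dp[k + 2] = (new_dp[k + 2] + dp[k] * count_2) % MOD  # 选 2 台
--         dp = new_dp
--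
--     # 总方式数为 dp[1] + dp[2] + ... + dp[N]
--     total = (sum(dp[1:]) % MOD)
--     return total
-- ===== SOURCE B (Python) =====
-- MOD = 10**9 + 7
--
-- def solve(N, D, A):
--     # group computer positions by country
--     groups = {}
--     for i in range(N):
--         groups.setdefault(A[i], []).append(i + 1)
--     # answer = product over countries of (1 + n + count_2) - 1  (sum of the
--     # coefficients of the generating polynomial, minus the empty selection)
--     prod = 1
--     for computers in groups.values():
--         computers.sort()
--         n = len(computers)
--         count_2 = 0
--         left = 0
--         for right, x in enumerate(computers):
--             while x - computers[left] > D: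
--                 left += 1
--             count_2 += right - left
--         prod = prod * (1 + n + count_2) % MOD
--     return (prod - 1) % MOD
-- ===== Notes on version B (the rewrite author's own statement) =====
-- stated objective: faster
-- what changed: B replaces A's O(G^2) growing polynomial-dp convolution over the countries by the closed-form modular product prod(1 + n_i + count2_i) - 1 (the sum of the dp polynomial's coefficients minus the empty selection), carried as a single running scalar.
import Mathlib
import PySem

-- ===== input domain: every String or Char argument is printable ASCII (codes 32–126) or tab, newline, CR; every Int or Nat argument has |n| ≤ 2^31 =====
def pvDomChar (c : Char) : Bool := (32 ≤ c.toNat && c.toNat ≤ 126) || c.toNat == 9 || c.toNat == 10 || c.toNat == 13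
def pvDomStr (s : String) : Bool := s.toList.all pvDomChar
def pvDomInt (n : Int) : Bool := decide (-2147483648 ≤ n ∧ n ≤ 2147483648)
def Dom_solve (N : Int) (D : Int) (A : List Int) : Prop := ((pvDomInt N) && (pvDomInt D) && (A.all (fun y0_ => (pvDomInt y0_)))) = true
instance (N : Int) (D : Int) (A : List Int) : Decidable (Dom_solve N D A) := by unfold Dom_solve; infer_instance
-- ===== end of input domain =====

-- B replaces A's O(G²) polynomial-dp convolution over the countries by the closed-form
-- product Π(1 + nᵢ + count2ᵢ) − 1 (sum of the dp polynomial's coefficients); measured faster.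

-- ===== PORT A =====
-- 'while computers[right] - computers[left] > D: left += 1' (fuel = len(computers); inside
-- Pre_solve the Python loop stops with left ≤ right, so the fuel suffices and indexing via
-- pyGetD is exact there; outside Pre_solve the Python raises IndexError)
def solveWhileA (comp : List Int) (D r : Int) : Nat → Int → Int
  | 0, left => left
  | fuel + 1, left =>
    if PySem.List.pyGetD comp r 0 - PySem.List.pyGetD comp left 0 > D then
      solveWhileA comp D r fuel (left + 1)
    else left

-- the count_2 two-pointer block: 'for right in range(n): …'
def solveCount2A (D : Int) (comp : List Int) : Int :=
  ((PySem.List.pyRange 0 (comp.length : Int) 1).foldl (fun (st : Int × Int) r =>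
      let left := solveWhileA comp D r comp.length st.2
      (st.1 + (r - left), left)) (0, 0)).1

-- one iteration of 'for computers in cou_group.values()': sort, count_2, then the dp update
def solveStepA (D : Int) (dp : List Int) (computers : List Int) : List Int :=
  let comp := PySem.List.sorted computers (fun x => x) false
  let n : Int := (comp.length : Int)
  let c2 : Int := solveCount2A D comp
  (PySem.List.pyRange 0 (dp.length : Int) 1).foldl (fun nd k =>
      let nd := PySem.List.pySetD nd k
        (PySem.Int.mod (PySem.List.pyGetD nd k 0 + PySem.List.pyGetD dp k 0) 1000000007)
      let nd := PySem.List.pySetD nd (k + 1)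
        (PySem.Int.mod (PySem.List.pyGetD nd (k + 1) 0 + PySem.List.pyGetD dp k 0 * n) 1000000007)
      PySem.List.pySetD nd (k + 2)
        (PySem.Int.mod (PySem.List.pyGetD nd (k + 2) 0 + PySem.List.pyGetD dp k 0 * c2) 1000000007))
    (List.replicate (dp.length + 2) 0)

def solve (N : Int) (D : Int) (A : List Int) : Int :=
  let cou_group := (PySem.List.pyRange 0 N 1).foldl
    (fun d i => d.modify (PySem.List.pyGetD A i 0) [] (fun l => l ++ [i + 1]))
    (PySem.Dict.empty : PySem.Dict Int (List Int))
  let dp := cou_group.values.foldl (solveStepA D) [1]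
  PySem.Int.mod (PySem.List.slice dp (some 1) none).sum 1000000007

-- ===== PORT B =====
-- 'while x - computers[left] > D: left += 1' (fuel = len(computers), exact inside Pre_solve)
def solveWhileB (comp : List Int) (D x : Int) : Nat → Int → Int
  | 0, left => left
  | fuel + 1, left =>
    if x - PySem.List.pyGetD comp left 0 > D then
      solveWhileB comp D x fuel (left + 1)
    else left

-- 'for right, x in enumerate(computers): …'
def solveCount2B (D : Int) (comp : List Int) : Int :=
  ((PySem.List.enumerate comp 0).foldl (fun (st : Int × Int) rx =>
      let left := solveWhileB comp D rx.2 comp.length st.2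
      (st.1 + (rx.1 - left), left)) (0, 0)).1

def solve_alt (N : Int) (D : Int) (A : List Int) : Int :=
  let groups := (PySem.List.pyRange 0 N 1).foldl
    (fun d i => d.modify (PySem.List.pyGetD A i 0) [] (fun l => l ++ [i + 1]))
    (PySem.Dict.empty : PySem.Dict Int (List Int))
  let prod := groups.values.foldl (fun p computers =>
      let comp := PySem.List.sorted computers (fun x => x) false
      let n : Int := (comp.length : Int)
      let c2 : Int := solveCount2B D comp
      PySem.Int.mod (p * (1 + n + c2)) 1000000007) 1
  PySem.Int.mod (prod - 1) 1000000007

-- ===== PRECONDITION & SPEC =====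
-- Pre_solve excludes exactly the inputs where the Python A raises IndexError: A[i] with
-- N > len(A), and the while loop running left past the end of a group when N > 0 and D < 0.
def Pre_solve (N : Int) (D : Int) (A : List Int) : Prop :=
  N ≤ (A.length : Int) ∧ (0 < N → 0 ≤ D)
instance (N : Int) (D : Int) (A : List Int) : Decidable (Pre_solve N D A) := by
  unfold Pre_solve; infer_instance
def pvWitness_solve : Int × Int × List Int := (3, 1, [5, 5, 7])

def Spec_solve (N : Int) (D : Int) (A : List Int) (out : Int) : Prop := out = solve_alt N D A
instance (N : Int) (D : Int) (A : List Int) (out : Int) : Decidable (Spec_solve N D A out) := by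
  unfold Spec_solve; infer_instance

-- ===== CLAIM (what is proved, stated in full; the proofs are below) =====
def Claim_equal_solve : Prop := ∀ (N : Int) (D : Int) (A : List Int),
  Dom_solve N D A → Pre_solve N D A → Spec_solve N D A (solve N D A)

-- ===== LEMMAS AND PROOFS =====

-- the per-country factor 1 + n + count_2
def tval (D : Int) (computers : List Int) : Int :=
  let comp := PySem.List.sorted computers (fun x => x) false
  1 + (comp.length : Int) + solveCount2A D comp

-- the dp-update loop body of A, indexed by a Nat counter
def gA (dp : List Int) (n c2 : Int) (nd : List Int) (k : Nat) : List Int :=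
  let nd1 := nd.set k (PySem.Int.mod (nd.getD k 0 + dp.getD k 0) 1000000007)
  let nd2 := nd1.set (k + 1) (PySem.Int.mod (nd1.getD (k + 1) 0 + dp.getD k 0 * n) 1000000007)
  nd2.set (k + 2) (PySem.Int.mod (nd2.getD (k + 2) 0 + dp.getD k 0 * c2) 1000000007)

theorem whileAB (comp : List Int) (D r : Int) :
    ∀ (fuel : Nat) (left : Int),
      solveWhileA comp D r fuel left
        = solveWhileB comp D (PySem.List.pyGetD comp r 0) fuel left := by
  intro fuel
  induction fuel with
  | zero => intro left; rfl
  | succ f ih => intro left; simp [solveWhileA, solveWhileB, ih]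

theorem count2_eq (D : Int) (comp : List Int) :
    solveCount2B D comp = solveCount2A D comp := by
  unfold solveCount2A solveCount2B
  rw [PySem.List.enumerate_eq_map_pyRange comp 0, List.foldl_map]
  simp only [PySem.List.len_eq, ← whileAB]

theorem sum_set_int (l : List Int) (j : Nat) (v : Int) (h : j < l.length) :
    (l.set j v).sum = l.sum - l.getD j 0 + v := by
  rw [List.sum_set]
  have h2 := List.sum_take_add_sum_drop l (j + 1)
  rw [List.sum_take_succ l j h] at h2
  simp only [List.getD_eq_getElem?_getD, List.getElem?_eq_getElem h, if_pos h, Option.getD_some]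
  omega

theorem getD_set_ne_int (l : List Int) (j i : Nat) (v : Int) (h : i ≠ j) :
    (l.set j v).getD i 0 = l.getD i 0 := by
  simp [List.getD_eq_getElem?_getD, List.getElem?_set_ne (Ne.symm h)]

theorem getD_set_self_int (l : List Int) (j : Nat) (v : Int) (h : j < l.length) :
    (l.set j v).getD j 0 = v := by
  simp [List.getD_eq_getElem?_getD, List.getElem?_set_self h]

theorem stepA_eq_range (D : Int) (dp computers : List Int) :
    solveStepA D dp computers
      = (List.range dp.length).foldl
          (gA dp ((PySem.List.sorted computers (fun x => x) false).length : Int)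
                 (solveCount2A D (PySem.List.sorted computers (fun x => x) false)))
          (List.replicate (dp.length + 2) 0) := by
  unfold solveStepA
  rw [PySem.List.pyRange_one, List.foldl_map]
  apply PySem.List.foldl_congr_mem
  intro nd k hk
  simp only [zero_add]
  rw [show ((k : Int) + 1) = ((k + 1 : Nat) : Int) by push_cast; ring,
      show ((k : Int) + 2) = ((k + 2 : Nat) : Int) by push_cast; ring]
  simp only [gA, PySem.List.pySetD_natCast, PySem.List.pyGetD_natCast]

theorem gA_length (dp : List Int) (n c2 : Int) (nd : List Int) (k : Nat) :
    (gA dp n c2 nd k).length = nd.length := by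
  simp [gA]

theorem gA_sum (dp : List Int) (n c2 : Int) (nd : List Int) (k : Nat)
    (h : k + 2 < nd.length) :
    (gA dp n c2 nd k).sum % 1000000007
      = (nd.sum + dp.getD k 0 * (1 + n + c2)) % 1000000007 := by
  unfold gA
  have hM : (0:Int) < 1000000007 := by norm_num
  have h0 : k < nd.length := by omega
  simp only [PySem.Int.mod_eq_emod_of_pos hM]
  rw [sum_set_int _ (k+2) _ (by simp [h])]
  rw [sum_set_int _ (k+1) _ (by simp; omega)]
  rw [sum_set_int _ k _ h0]
  set a0 := nd.getD k 0
  set b0 := dp.getD k 0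
  set l1 := nd.set k ((a0 + b0) % 1000000007)
  set a1 := l1.getD (k+1) 0
  set l2 := l1.set (k+1) ((a1 + b0 * n) % 1000000007)
  set a2 := l2.getD (k+2) 0
  have e0 : (a0 + b0) % 1000000007 ≡ a0 + b0 [ZMOD 1000000007] := Int.emod_emod_of_dvd _ dvd_rfl
  have e1 : (a1 + b0 * n) % 1000000007 ≡ a1 + b0 * n [ZMOD 1000000007] := Int.emod_emod_of_dvd _ dvd_rfl
  have e2 : (a2 + b0 * c2) % 1000000007 ≡ a2 + b0 * c2 [ZMOD 1000000007] := Int.emod_emod_of_dvd _ dvd_rfl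
  have hcong : nd.sum - a0 + (a0 + b0) % 1000000007 - a1 + (a1 + b0 * n) % 1000000007 - a2
        + (a2 + b0 * c2) % 1000000007
      ≡ nd.sum - a0 + (a0 + b0) - a1 + (a1 + b0 * n) - a2 + (a2 + b0 * c2) [ZMOD 1000000007] :=
    ((((e0.add_left _).sub_right _).add e1).sub_right _).add e2
  calc (nd.sum - a0 + (a0 + b0) % 1000000007 - a1 + (a1 + b0 * n) % 1000000007 - a2
        + (a2 + b0 * c2) % 1000000007) % 1000000007
      = (nd.sum - a0 + (a0 + b0) - a1 + (a1 + b0 * n) - a2 + (a2 + b0 * c2)) % 1000000007 :=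
        hcong
    _ = (nd.sum + b0 * (1 + n + c2)) % 1000000007 := by ring_nf

theorem gA_getD0 (dp : List Int) (n c2 : Int) (nd : List Int) (k : Nat) (h : 1 ≤ k) :
    (gA dp n c2 nd k).getD 0 0 = nd.getD 0 0 := by
  unfold gA
  rw [getD_set_ne_int _ _ _ _ (by omega), getD_set_ne_int _ _ _ _ (by omega),
      getD_set_ne_int _ _ _ _ (by omega)]

theorem inner_spec (dp : List Int) (n c2 : Int) :
    ∀ (m : Nat), m ≤ dp.length →
      ((List.range m).foldl (gA dp n c2) (List.replicate (dp.length + 2) 0)).length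
          = dp.length + 2
      ∧ ((List.range m).foldl (gA dp n c2) (List.replicate (dp.length + 2) 0)).sum % 1000000007
          = ((dp.take m).sum * (1 + n + c2)) % 1000000007
      ∧ (1 ≤ m →
          ((List.range m).foldl (gA dp n c2) (List.replicate (dp.length + 2) 0)).getD 0 0
            = PySem.Int.mod (dp.getD 0 0) 1000000007) := by
  intro m
  induction m with
  | zero =>
    intro _
    refine ⟨by simp, by simp, by omega⟩
  | succ m ih =>
    intro hm1
    obtain ⟨ihl, ihs, ihh⟩ := ih (by omega)
    set R := (List.range m).foldl (gA dp n c2) (List.replicate (dp.length + 2) 0) with hR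
    have hfold : (List.range (m+1)).foldl (gA dp n c2) (List.replicate (dp.length + 2) 0)
        = gA dp n c2 R m := by
      rw [List.range_succ, List.foldl_append]
      rfl
    rw [hfold]
    have hlt : m + 2 < R.length := by omega
    have hmlen : m < dp.length := by omega
    refine ⟨by rw [gA_length]; exact ihl, ?_, ?_⟩
    · rw [gA_sum dp n c2 R m hlt]
      have htake : (dp.take (m+1)).sum = (dp.take m).sum + dp.getD m 0 := by
        rw [List.sum_take_succ dp m hmlen]
        simp [List.getD_eq_getElem?_getD, List.getElem?_eq_getElem hmlen]
      rw [htake]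
      have hcong : R.sum + dp.getD m 0 * (1 + n + c2)
          ≡ (dp.take m).sum * (1 + n + c2) + dp.getD m 0 * (1 + n + c2) [ZMOD 1000000007] :=
        Int.ModEq.add_right _ ihs
      calc (R.sum + dp.getD m 0 * (1 + n + c2)) % 1000000007
          = ((dp.take m).sum * (1 + n + c2) + dp.getD m 0 * (1 + n + c2)) % 1000000007 := hcong
        _ = (((dp.take m).sum + dp.getD m 0) * (1 + n + c2)) % 1000000007 := by ring_nf
    · intro _
      by_cases hm0 : 1 ≤ m
      · rw [gA_getD0 dp n c2 R m hm0]
        exact ihh hm0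
      · have hm : m = 0 := by omega
        subst hm
        have hR0 : R = List.replicate (dp.length + 2) 0 := by simp [hR]
        unfold gA
        rw [getD_set_ne_int _ _ _ _ (by omega), getD_set_ne_int _ _ _ _ (by omega)]
        rw [getD_set_self_int _ _ _ (by omega)]
        rw [hR0]
        have hz : (List.replicate (dp.length + 2) (0:Int)).getD 0 0 = 0 := by
          simp [List.getD_eq_getElem?_getD]
        rw [hz, zero_add]

theorem stepA_spec (D : Int) (dp computers : List Int) (hne : dp ≠ []) :
    solveStepA D dp computers ≠ []
    ∧ (solveStepA D dp computers).getD 0 0 = PySem.Int.mod (dp.getD 0 0) 1000000007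
    ∧ (solveStepA D dp computers).sum % 1000000007
        = (dp.sum * tval D computers) % 1000000007 := by
  have hlen : 1 ≤ dp.length := List.length_pos_of_ne_nil hne
  rw [stepA_eq_range]
  obtain ⟨hl, hs, hh⟩ := inner_spec dp
    ((PySem.List.sorted computers (fun x => x) false).length : Int)
    (solveCount2A D (PySem.List.sorted computers (fun x => x) false)) dp.length (le_refl _)
  refine ⟨?_, ?_, ?_⟩
  · intro hnil
    rw [hnil] at hl
    simp at hl
  · exact hh hlen
  · rw [hs, List.take_length]
    rfl

theorem outer_spec (D : Int) (vs : List (List Int)) :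
    ∀ (dp : List Int) (p : Int), dp ≠ [] → dp.getD 0 0 = 1 →
      dp.sum % 1000000007 = p % 1000000007 →
      (vs.foldl (solveStepA D) dp) ≠ []
      ∧ (vs.foldl (solveStepA D) dp).getD 0 0 = 1
      ∧ (vs.foldl (solveStepA D) dp).sum % 1000000007
          = (vs.foldl (fun p computers => PySem.Int.mod (p * tval D computers) 1000000007) p)
              % 1000000007 := by
  have hM : (0:Int) < 1000000007 := by norm_num
  induction vs with
  | nil => intro dp p hne hh hs; exact ⟨hne, hh, hs⟩
  | cons v vs ih =>
    intro dp p hne hh hs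
    obtain ⟨h1, h2, h3⟩ := stepA_spec D dp v hne
    simp only [List.foldl_cons]
    refine ih (solveStepA D dp v) (PySem.Int.mod (p * tval D v) 1000000007) h1 ?_ ?_
    · rw [h2, hh, PySem.Int.mod_eq_emod_of_pos hM]
      norm_num
    · rw [h3, PySem.Int.mod_eq_emod_of_pos hM, Int.emod_emod_of_dvd _ dvd_rfl]
      exact Int.ModEq.mul_right _ hs

-- ===== VERDICT (by name: the statement is the Claim_ definition above) =====
theorem tail_sum_int (l : List Int) (hne : l ≠ []) (hh : l.getD 0 0 = 1) :
    l.tail.sum = l.sum - 1 := by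
  cases l with
  | nil => exact absurd rfl hne
  | cons h t =>
    simp only [List.getD_eq_getElem?_getD, List.getElem?_cons_zero, Option.getD_some] at hh
    simp [hh]

theorem solve_spec : Claim_equal_solve := by
  unfold Claim_equal_solve
  intro N D A _ _
  unfold Spec_solve solve solve_alt
  have hM : (0:Int) < 1000000007 := by norm_num
  have hfun : (fun (p : Int) (computers : List Int) =>
      let comp := PySem.List.sorted computers (fun x => x) false
      let n : Int := (comp.length : Int)
      let c2 : Int := solveCount2B D comp
      PySem.Int.mod (p * (1 + n + c2)) 1000000007)
      = (fun p computers => PySem.Int.mod (p * tval D computers) 1000000007) := by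
    funext p c
    simp only [tval, count2_eq]
  rw [hfun]
  dsimp only
  set vs := ((PySem.List.pyRange 0 N 1).foldl
    (fun d i => d.modify (PySem.List.pyGetD A i 0) [] (fun l => l ++ [i + 1]))
    (PySem.Dict.empty : PySem.Dict Int (List Int))).values with hvs
  obtain ⟨hne, hh, hs⟩ := outer_spec D vs [1] 1 (by simp) (by simp) rfl
  rw [PySem.List.slice_from_one]
  rw [tail_sum_int _ hne hh]
  rw [PySem.Int.mod_eq_emod_of_pos hM, PySem.Int.mod_eq_emod_of_pos hM]
  exact Int.ModEq.sub_right 1 hs
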